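-- pv_equiv track=rewrite | github.com/BCM-Neurosurgery/video-sync | pyvideosync/fixanomaly.py | fix_discontinuities
-- ===== SOURCE A (Python) =====
-- from typing import List, Tuple, Any, Optional
--
-- def fix_discontinuities(arr: List[int]) -> List[int]:
--     """
--     Repairs type I to type IV anomalies in a 1-D integer list.
--
--     Anomalies:
--         1. Type I: [20323583, 0, 20323585]
--         2. Type II: [20332543, 0, 1, 2, 3, ..., 127, 0, 20332673, 20332674]
--         3. Type III: [30133802, 30133804, 30133805]
--         4. Type IV: [-1, 20323572]
--
--     Observation:
--         1. The anomalies usually go from -1 to 127, the maximum is 127.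
--         2. There shouldn't be adjacent 0s.
--         3. -1 appears at the beginning of the list; there can be adjacent -1s.
--
--     Heuristic approach:
--         - Replace everything < 128 with -1.
--         - If max value ≤ 127, or list is empty, return early.
--         - Fill leading -1s based on the first valid number.
--         - Fill -1 gaps in the middle exhaustively between surrounding valid numbers.
--         - Gaps between valid numbers > 1 are filled exhaustively.
--
--     Args:
--         arr (List[int]): 1-D list of integers.
--
--     Returns:
--         List[int]: Gap-filled integer sequence.
--     """
--     # Copy to avoid mutating the input
--     seq = arr.copy()
--     if not seq:
--         return []
--
--     # If everything is ≤ 127, assume it's already "just 0..127" and do nothing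
--     if max(seq) <= 127:
--         return seq.copy()
--
--     # Step 1: replace small values with -1
--     rep = [-1 if x < 128 else x for x in seq]
--     n = len(rep)
--     result: List[int] = []
--
--     # Step 2: find the first real value (> -1)
--     first_valid_idx = next((i for i, x in enumerate(rep) if x != -1), None)
--     if first_valid_idx is None:
--         return []
--
--     first_val = rep[first_valid_idx]
--     # Fill any leading -1s by counting backward from the first valid
--     for k in range(first_valid_idx):
--         result.append(first_val - (first_valid_idx - k))
--     result.append(first_val)
--
--     prev = first_val
--     i = first_valid_idx + 1
--
--     # Step 3: walk through the rest
--     while i < n: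
--         cur = rep[i]
--         if cur == -1:
--             # find next valid
--             j = i + 1
--             while j < n and rep[j] == -1:
--                 j += 1
--             if j < n:
--                 next_val = rep[j]
--                 # fill all the in‑between values
--                 for fill in range(prev + 1, next_val):
--                     result.append(fill)
--                 result.append(next_val)
--                 prev = next_val
--                 i = j + 1
--             else:
--                 # trailing -1s: fill forward from prev
--                 trailing_count = n - i
--                 for offset in range(1, trailing_count + 1):
--                     result.append(prev + offset)
--                 break
--         else:
--             # a real value; if there's a numeric gap, fill it
--             if cur > prev + 1:
--                 for fill in range(prev + 1, cur):
--                     result.append(fill)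
--             result.append(cur)
--             prev = cur
--             i += 1
--
--     return result
-- ===== SOURCE B (Python) =====
-- from typing import List
--
-- def fix_discontinuities(arr: List[int]) -> List[int]:
--     """Two-phase rewrite: collect the valid (index, value) pairs once, then emit
--     leading fill, uniform interior gap fills, and the trailing fill."""
--     if not arr:
--         return []
--     if max(arr) <= 127:
--         return list(arr)
--
--     rep = [-1 if x < 128 else x for x in arr]
--     n = len(rep)
--     valids = [(i, x) for i, x in enumerate(rep) if x != -1]
--     if not valids:
--         return []
--
--     first_idx, first_val = valids[0]
--     result = [first_val - (first_idx - k) for k in range(first_idx)]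
--     result.append(first_val)
--
--     prev, last_idx = first_val, first_idx
--     for i, v in valids[1:]:
--         result.extend(range(prev + 1, v))
--         result.append(v)
--         prev, last_idx = v, i
--
--     result.extend(prev + offset for offset in range(1, n - last_idx))
--     return result
-- ===== Notes on version B (the rewrite author's own statement) =====
-- stated objective: simpler
-- what changed: B replaces A's index-walking outer while loop with an inner scan for the next valid element by one comprehension collecting the (index,value) valid pairs and a single uniform fold over them, with the leading and trailing fills factored out.
import Mathlib
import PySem

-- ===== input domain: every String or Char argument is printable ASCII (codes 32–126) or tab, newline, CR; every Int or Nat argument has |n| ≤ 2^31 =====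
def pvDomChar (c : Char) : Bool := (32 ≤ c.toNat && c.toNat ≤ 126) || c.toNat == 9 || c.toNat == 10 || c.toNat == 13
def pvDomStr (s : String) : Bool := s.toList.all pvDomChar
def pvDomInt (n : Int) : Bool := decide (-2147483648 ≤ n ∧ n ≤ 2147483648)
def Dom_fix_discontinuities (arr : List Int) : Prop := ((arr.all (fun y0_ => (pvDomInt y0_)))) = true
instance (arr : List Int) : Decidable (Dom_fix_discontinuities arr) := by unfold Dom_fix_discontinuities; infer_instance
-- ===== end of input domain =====

-- B replaces A's nested while loops (outer index walk + inner scan for the next valid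
-- element) by one pass collecting the valid (index, value) pairs and a uniform fold
-- over them; objective: simpler.

-- ===== PORT A =====

-- inner 'while j < n and rep[j] == -1: j += 1' of A
def aFind (rep : List Int) (j : Nat) : Nat :=
  if _h : j < rep.length then
    if rep.getD j 0 = -1 then aFind rep (j+1) else j
  else j
termination_by rep.length - j

-- needed only for aLoop's termination
theorem aFind_le (rep : List Int) (j : Nat) : j ≤ aFind rep j := by
  unfold aFind
  split
  · split
    · have := aFind_le rep (j+1); omega
    · exact Nat.le_refl j
  · exact Nat.le_refl j
termination_by rep.length - j

-- outer 'while i < n' of A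
def aLoop (rep : List Int) (prev : Int) (i : Nat) : List Int :=
  if _hi : i < rep.length then
    let cur := rep.getD i 0
    if cur = -1 then
      let j := aFind rep (i+1)
      if _hj : j < rep.length then
        let next_val := rep.getD j 0
        PySem.List.pyRange (prev+1) next_val 1 ++ [next_val] ++ aLoop rep next_val (j+1)
      else
        (PySem.List.pyRange 1 (((rep.length - i : Nat) : Int) + 1) 1).map (fun o => prev + o)
    else
      (if cur > prev + 1 then PySem.List.pyRange (prev+1) cur 1 else []) ++ [cur]
        ++ aLoop rep cur (i+1)
  else []
termination_by rep.length - i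
decreasing_by
  · have := aFind_le rep (i+1); omega
  · omega

def fix_discontinuities (arr : List Int) : List Int :=
  if arr = [] then []
  else
    match PySem.List.max? arr (fun x => x) with
    | none => []
    | some m =>
      if m ≤ 127 then arr
      else
        let rep := arr.map (fun x => if x < 128 then -1 else x)
        match rep.findIdx? (· != -1) with
        | none => []
        | some fi =>
          let fv := rep.getD fi 0
          (PySem.List.pyRange 0 (fi : Int) 1).map (fun k => fv - ((fi : Int) - k))
            ++ [fv] ++ aLoop rep fv (fi+1)

-- ===== PORT B =====

-- 'for i, v in valids[1:]' of B, state (result, prev, last_idx)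
def bStep (st : List Int × Int × Int) (p : Int × Int) : List Int × Int × Int :=
  (st.1 ++ PySem.List.pyRange (st.2.1 + 1) p.2 1 ++ [p.2], p.2, p.1)

def fix_discontinuities_alt (arr : List Int) : List Int :=
  if arr = [] then []
  else
    match PySem.List.max? arr (fun x => x) with
    | none => []
    | some m =>
      if m ≤ 127 then arr
      else
        let rep := arr.map (fun x => if x < 128 then -1 else x)
        let n : Int := rep.length
        let valids := (PySem.List.enumerate rep 0).filter (fun p => p.2 != -1)
        match valids with
        | [] => []
        | (fi, fv) :: rest =>
          let lead := (PySem.List.pyRange 0 fi 1).map (fun k => fv - (fi - k))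
          let st := rest.foldl bStep (lead ++ [fv], fv, fi)
          st.1 ++ (PySem.List.pyRange 1 (n - st.2.2) 1).map (fun o => st.2.1 + o)

-- ===== PRECONDITION & SPEC =====
def Spec_fix_discontinuities (arr : List Int) (out : List Int) : Prop := out = fix_discontinuities_alt arr
instance (arr : List Int) (out : List Int) : Decidable (Spec_fix_discontinuities arr out) := by unfold Spec_fix_discontinuities; infer_instance

-- ===== CLAIM (what is proved, stated in full; the proofs are below) =====
def Claim_equal_fix_discontinuities : Prop := ∀ (arr : List Int), Dom_fix_discontinuities arr → Spec_fix_discontinuities arr (fix_discontinuities arr)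

-- ===== LEMMAS AND PROOFS =====

-- the valid (index, value) pairs of l, indices starting at k
def vlist (l : List Int) (k : Int) : List (Int × Int) :=
  match l with
  | [] => []
  | x :: xs => if x = -1 then vlist xs (k+1) else (k, x) :: vlist xs (k+1)

-- common emission shape: interior fills then the trailing fill from position i
def chainGo (n : Int) (vs : List (Int × Int)) (prev : Int) (i : Int) : List Int :=
  match vs with
  | [] => (PySem.List.pyRange 1 (n - i + 1) 1).map (fun o => prev + o)
  | (j, v) :: rest => PySem.List.pyRange (prev+1) v 1 ++ [v] ++ chainGo n rest v (j+1)

theorem venum (l : List Int) (k : Int) :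
    (PySem.List.enumerate l k).filter (fun p => p.2 != -1) = vlist l k := by
  induction l generalizing k with
  | nil => simp [PySem.List.enumerate_nil, vlist]
  | cons x xs ih =>
    simp only [PySem.List.enumerate_cons, List.filter_cons, vlist]
    by_cases hx : x = -1 <;> simp [hx, ih]
theorem vlist_findIdx_none (l : List Int) (k : Int)
    (h : l.findIdx? (· != -1) = none) : vlist l k = [] := by
  induction l generalizing k with
  | nil => rfl
  | cons x xs ih =>
    rw [List.findIdx?_cons] at h
    by_cases hx : x = -1
    · rw [if_neg (by simp [hx]), Option.map_eq_none_iff] at h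
      simp only [vlist, if_pos hx]
      exact ih (k+1) h
    · rw [if_pos (by simpa using hx)] at h
      cases h

theorem vlist_findIdx_some (l : List Int) (k : Int) (fi : Nat)
    (h : l.findIdx? (· != -1) = some fi) :
    vlist l k = (k + fi, l.getD fi 0) :: vlist (l.drop (fi+1)) (k + fi + 1) := by
  induction l generalizing k fi with
  | nil => simp at h
  | cons x xs ih =>
    rw [List.findIdx?_cons] at h
    by_cases hx : x = -1
    · rw [if_neg (by simp [hx]), Option.map_eq_some_iff] at h
      obtain ⟨fi', hfi', rfl⟩ := h
      simp only [vlist, if_pos hx]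
      have e1 : (k + ((fi' + 1 : Nat) : Int), (x :: xs).getD (fi' + 1) 0) = (k + 1 + (fi' : Int), xs.getD fi' 0) := by
        rw [Prod.mk.injEq]
        refine ⟨by push_cast; ring, by simp [List.getD]⟩
      have e2 : vlist ((x :: xs).drop (fi' + 1 + 1)) (k + ((fi' + 1 : Nat) : Int) + 1)
          = vlist (xs.drop (fi' + 1)) (k + 1 + (fi' : Int) + 1) := by
        simp only [List.drop_succ_cons]
        congr 1
        push_cast; ring
      rw [e1, e2, ih (k+1) fi' hfi']
    · rw [if_pos (by simpa using hx)] at h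
      cases h
      simp [vlist, hx]
theorem aFind_step (rep : List Int) (i : Nat) (hi : i < rep.length)
    (hv : rep.getD i 0 = -1) : aFind rep i = aFind rep (i+1) := by
  conv_lhs => rw [aFind.eq_def]
  rw [dif_pos hi, if_pos hv]

theorem aFind_stop (rep : List Int) (i : Nat)
    (h : ¬ (i < rep.length ∧ rep.getD i 0 = -1)) : aFind rep i = i := by
  rw [aFind.eq_def]
  by_cases hi : i < rep.length
  · rw [dif_pos hi, if_neg (fun hv => h ⟨hi, hv⟩)]
  · rw [dif_neg hi]

theorem drop_cons_getD (rep : List Int) (i : Nat) (hi : i < rep.length) :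
    rep.drop i = rep.getD i 0 :: rep.drop (i+1) := by
  rw [List.getD_eq_getElem rep 0 hi]
  exact List.drop_eq_getElem_cons hi

-- all elements of [i, aFind rep i) are -1, so the valid pairs from i and from aFind rep i agree
theorem vlist_drop_aFind (rep : List Int) (d i : Nat) (hd : rep.length ≤ i + d) :
    vlist (rep.drop i) i = vlist (rep.drop (aFind rep i)) (aFind rep i) := by
  induction d generalizing i with
  | zero =>
    rw [aFind_stop rep i (by omega)]
  | succ d' ih =>
    by_cases hi : i < rep.length
    · by_cases hv : rep.getD i 0 = -1
      · rw [aFind_step rep i hi hv, drop_cons_getD rep i hi]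
        simp only [vlist, if_pos hv]
        have := ih (i+1) (by omega)
        push_cast at this ⊢
        exact this
      · rw [aFind_stop rep i (by tauto)]
    · rw [aFind_stop rep i (by omega)]

theorem aFind_valid (rep : List Int) (i : Nat) (h : aFind rep i < rep.length) :
    rep.getD (aFind rep i) 0 ≠ -1 := by
  by_cases hi : i < rep.length
  · by_cases hv : rep.getD i 0 = -1
    · rw [aFind_step rep i hi hv] at h ⊢
      exact aFind_valid rep (i+1) h
    · rwa [aFind_stop rep i (by tauto)]
  · rw [aFind_stop rep i (by omega)] at h
    omega
termination_by rep.length - i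
-- A's outer loop emits exactly chainGo over the remaining valid pairs
theorem aLoop_eq (rep : List Int) (d : Nat) :
    ∀ (i : Nat) (prev : Int), rep.length ≤ i + d →
    aLoop rep prev i = chainGo (rep.length) (vlist (rep.drop i) i) prev i := by
  induction d with
  | zero =>
    intro i prev hd
    have hni : ¬ i < rep.length := by omega
    rw [List.drop_eq_nil_of_le (by omega), aLoop.eq_def, dif_neg hni]
    simp only [vlist, chainGo]
    rw [PySem.List.pyRange_one_eq_nil (by omega : (rep.length : Int) - i + 1 ≤ 1)]
    simp
  | succ d' ih =>
    intro i prev hd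
    by_cases hi : i < rep.length
    · by_cases hv : rep.getD i 0 = -1
      · -- cur == -1: jump to j := aFind rep (i+1)
        rw [aLoop.eq_def, dif_pos hi]
        simp only [if_pos hv]
        have hvl : vlist (rep.drop i) (i : Int)
            = vlist (rep.drop (aFind rep (i+1))) ((aFind rep (i+1) : Nat) : Int) := by
          rw [drop_cons_getD rep i hi]
          simp only [vlist, if_pos hv]
          have := vlist_drop_aFind rep d' (i+1) (by omega)
          push_cast at this ⊢
          exact this
        rw [hvl]
        have hij : i + 1 ≤ aFind rep (i+1) := aFind_le rep (i+1)
        by_cases hjn : aFind rep (i+1) < rep.length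
        · rw [dif_pos hjn]
          have hjv : rep.getD (aFind rep (i+1)) 0 ≠ -1 := aFind_valid rep (i+1) hjn
          rw [drop_cons_getD rep (aFind rep (i+1)) hjn]
          simp only [vlist, if_neg hjv, chainGo]
          rw [ih (aFind rep (i+1) + 1) (rep.getD (aFind rep (i+1)) 0) (by omega)]
          congr 2
        · rw [dif_neg hjn]
          rw [List.drop_eq_nil_of_le (by omega : rep.length ≤ aFind rep (i+1))]
          simp only [vlist, chainGo]
          congr 2
          omega
      · -- a real value
        rw [aLoop.eq_def, dif_pos hi]
        simp only [if_neg hv]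
        rw [drop_cons_getD rep i hi]
        simp only [vlist, if_neg hv, chainGo]
        rw [ih (i+1) (rep.getD i 0) (by omega)]
        have hfill : (if rep.getD i 0 > prev + 1 then PySem.List.pyRange (prev+1) (rep.getD i 0) 1 else [])
            = PySem.List.pyRange (prev+1) (rep.getD i 0) 1 := by
          split
          · rfl
          · rw [PySem.List.pyRange_one_eq_nil (by omega)]
        rw [hfill]
        congr 2
    · rw [List.drop_eq_nil_of_le (by omega), aLoop.eq_def, dif_neg hi]
      simp only [vlist, chainGo]
      rw [PySem.List.pyRange_one_eq_nil (by omega : (rep.length : Int) - i + 1 ≤ 1)]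
      simp
-- B's fold plus its trailing fill is chainGo over the remaining valid pairs
theorem foldB_eq (n : Int) (rest : List (Int × Int)) :
    ∀ (acc : List Int) (prev li : Int),
    (rest.foldl bStep (acc, prev, li)).1
      ++ (PySem.List.pyRange 1 (n - (rest.foldl bStep (acc, prev, li)).2.2) 1).map
           (fun o => (rest.foldl bStep (acc, prev, li)).2.1 + o)
      = acc ++ chainGo n rest prev (li+1) := by
  induction rest with
  | nil =>
    intro acc prev li
    simp only [List.foldl_nil, chainGo]
    have h : n - (li + 1) + 1 = n - li := by ring
    rw [h]
  | cons p rest ih =>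
    intro acc prev li
    obtain ⟨j, v⟩ := p
    simp only [List.foldl_cons, bStep, chainGo]
    rw [ih]
    simp [List.append_assoc]

-- ===== VERDICT (by name: the statement is the Claim_ definition above) =====
theorem fix_discontinuities_spec : Claim_equal_fix_discontinuities := by
  intro arr _
  unfold Spec_fix_discontinuities fix_discontinuities fix_discontinuities_alt
  by_cases he : arr = []
  · simp [he]
  · simp only [he, if_neg, not_false_iff]
    cases hm : PySem.List.max? arr (fun x => x) with
    | none => rfl
    | some m =>
      by_cases h127 : m ≤ 127
      · simp [h127]
      · simp only [h127, if_neg, not_false_iff]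
        set rep := arr.map (fun x => if x < 128 then -1 else x) with hrep
        rw [venum rep 0]
        cases hfi : rep.findIdx? (· != -1) with
        | none =>
          rw [vlist_findIdx_none rep 0 hfi]
        | some fi =>
          rw [vlist_findIdx_some rep 0 fi hfi]
          simp only [zero_add]
          rw [foldB_eq]
          rw [aLoop_eq rep rep.length (fi+1) (rep.getD fi 0) (by omega)]
          push_cast
          simp [List.append_assoc]
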